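-- pv_equiv track=rewrite | github.com/borgdev/anant | anant/kg/operations/reasoning_operations.py | _get_all_superclasses
-- ===== SOURCE A (Python) =====
-- from typing import Dict, List, Any, Optional, Set, Tuple, Callable
-- from collections import defaultdict, deque
--
-- def _get_all_superclasses(class_uri: str, subclass_map: Dict[str, Set[str]]) -> Set[str]:
--     """Get all superclasses for a given class (transitive closure)"""
--     superclasses = set()
--     visited = set()
--     queue = deque([class_uri])
--
--     while queue:
--         current_class = queue.popleft()
--         if current_class in visited:
--             continue
--
--         visited.add(current_class)
--
--         if current_class in subclass_map:
--             for superclass in subclass_map[current_class]: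
--                 if superclass not in superclasses:
--                     superclasses.add(superclass)
--                     queue.append(superclass)
--
--     return superclasses
-- ===== SOURCE B (Python) =====
-- def _get_all_superclasses(class_uri, subclass_map):
--     """Get all superclasses for a given class (transitive closure)."""
--     # Naive fixpoint iteration: rescan every known class each round until stable.
--     result = []  # superclasses in first-discovery order; doubles as the dedup guard
--     changed = True
--     while changed:
--         changed = False
--         for node in [class_uri] + result:
--             for s in subclass_map.get(node, ()):
--                 if s not in result:
--                     result.append(s)
--                     changed = True
--     return set(result)
-- ===== Notes on version B (the rewrite author's own statement) =====
-- stated objective: alternative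
-- what changed: Replaces A's deque-plus-visited-set BFS by naive fixpoint iteration (Datalog-style): no queue and no visited set; each round rescans every class known so far against the map and appends newly found superclasses to the result list, stopping when a full round adds nothing.
import Mathlib
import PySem

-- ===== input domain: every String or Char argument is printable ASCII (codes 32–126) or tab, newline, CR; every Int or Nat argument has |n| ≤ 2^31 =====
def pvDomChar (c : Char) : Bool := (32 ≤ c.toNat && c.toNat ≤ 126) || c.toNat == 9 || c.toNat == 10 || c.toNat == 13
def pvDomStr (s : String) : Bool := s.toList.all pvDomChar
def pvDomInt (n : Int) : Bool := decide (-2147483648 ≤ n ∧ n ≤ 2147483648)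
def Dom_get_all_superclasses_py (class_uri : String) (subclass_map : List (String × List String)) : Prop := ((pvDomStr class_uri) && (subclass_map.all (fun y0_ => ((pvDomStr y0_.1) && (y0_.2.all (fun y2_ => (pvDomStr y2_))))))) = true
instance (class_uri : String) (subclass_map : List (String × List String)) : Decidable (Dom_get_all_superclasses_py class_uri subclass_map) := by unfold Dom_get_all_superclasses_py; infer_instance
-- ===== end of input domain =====

-- B replaces A's deque-plus-visited-set BFS by naive fixpoint iteration: each round rescans
-- every class known so far and appends newly found superclasses, until a round adds nothing
-- (objective: alternative; no speed claim).

-- ===== PORT A =====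
-- first-match association-list lookup = 'current_class in subclass_map' / 'subclass_map[current_class]'
def pvLookupA (m : List (String × List String)) (k : String) : Option (List String) :=
  match m with
  | [] => none
  | (k', v) :: t => if k' = k then some v else pvLookupA t k

-- 'if superclass not in superclasses: superclasses.add(superclass); queue.append(superclass)'
def pvStepA (p : PySem.Set String × List String) (s : String) : PySem.Set String × List String :=
  if s ∈ p.1 then p else (PySem.Set.add p.1 s, p.2 ++ [s])

-- the 'while queue' loop; the fuel only makes the recursion structural (never exhausted
-- on the call get_all_superclasses_py makes)
def pvLoopA (m : List (String × List String)) :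
    Nat → PySem.Set String → PySem.Set String → List String → List String
  | 0, sc, _, _ => sc
  | _ + 1, sc, _, [] => sc
  | f + 1, sc, vis, c :: q =>
    if c ∈ vis then pvLoopA m f sc vis q
    else
      let vis' := PySem.Set.add vis c
      match pvLookupA m c with
      | some vals =>
        let p := vals.foldl pvStepA (sc, q)
        pvLoopA m f p.1 vis' p.2
      | none => pvLoopA m f sc vis' q

def get_all_superclasses_py (class_uri : String) (subclass_map : List (String × List String)) : List String :=
  pvLoopA subclass_map (1 + (subclass_map.map (fun p => p.2.length)).sum)
    PySem.Set.empty PySem.Set.empty [class_uri]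

-- ===== PORT B =====
-- 'subclass_map.get(node, ())'
def pvGetB (m : List (String × List String)) (k : String) : List String :=
  match m with
  | [] => []
  | (k', v) :: t => if k' = k then v else pvGetB t k

-- 'if s not in result: result.append(s); changed = True'  (state = (result, changed))
def pvInnerB (st : List String × Bool) (s : String) : List String × Bool :=
  if s ∈ st.1 then st else (st.1 ++ [s], true)

-- 'for s in subclass_map.get(node, ()): …'
def pvScanB (m : List (String × List String)) (st : List String × Bool) (node : String) :
    List String × Bool :=
  (pvGetB m node).foldl pvInnerB st

-- the 'while changed' loop: one full rescan of '[class_uri] + result' per fuel unit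
-- (the fuel only makes the recursion structural; never exhausted on the call below)
def pvWhileB (m : List (String × List String)) (class_uri : String) :
    Nat → List String → List String
  | 0, res => res
  | f + 1, res =>
    let st := (class_uri :: res).foldl (pvScanB m) (res, false)
    if st.2 then pvWhileB m class_uri f st.1 else st.1

def get_all_superclasses_py_alt (class_uri : String) (subclass_map : List (String × List String)) : List String :=
  PySem.Set.ofList
    (pvWhileB subclass_map class_uri (1 + (subclass_map.map (fun p => p.2.length)).sum) [])

-- ===== PRECONDITION & SPEC =====
def Spec_get_all_superclasses_py (class_uri : String) (subclass_map : List (String × List String)) (out : List String) : Prop := out = get_all_superclasses_py_alt class_uri subclass_map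
instance (class_uri : String) (subclass_map : List (String × List String)) (out : List String) : Decidable (Spec_get_all_superclasses_py class_uri subclass_map out) := by unfold Spec_get_all_superclasses_py; infer_instance

-- ===== CLAIM (what is proved, stated in full; the proofs are below) =====
def Claim_equal_get_all_superclasses_py : Prop := ∀ (class_uri : String) (subclass_map : List (String × List String)), Dom_get_all_superclasses_py class_uri subclass_map → Spec_get_all_superclasses_py class_uri subclass_map (get_all_superclasses_py class_uri subclass_map)

-- ===== LEMMAS AND PROOFS =====

-- the new elements a scan of vals adds to the accumulated list sc, in order
def pvDelta (sc : List String) : List String → List String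
  | [] => []
  | s :: t => if s ∈ sc then pvDelta sc t else s :: pvDelta (sc ++ [s]) t

-- A's queue loop with the (provably no-op) visited set removed
def pvLoopA' (m : List (String × List String)) :
    Nat → List String → List String → List String
  | 0, sc, _ => sc
  | _ + 1, sc, [] => sc
  | f + 1, sc, c :: q =>
    pvLoopA' m f (sc ++ pvDelta sc (pvGetB m c)) (q ++ pvDelta sc (pvGetB m c))

-- scanning a node list fs from accumulator sc: final accumulator and the new elements
def pvMulti (m : List (String × List String)) (sc : List String) :
    List String → List String × List String
  | [] => (sc, [])
  | c :: fs =>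
    let d := pvDelta sc (pvGetB m c)
    let r := pvMulti m (sc ++ d) fs
    (r.1, d ++ r.2)

def pvFlatVals (m : List (String × List String)) : List String := (m.map (fun p => p.2)).flatten

-- distinct possible additions not yet in sc (the termination potential)
def pvCnt (m : List (String × List String)) (sc : List String) : Nat :=
  ((PySem.Set.ofList (pvFlatVals m)).filter (fun x => decide (x ∉ sc))).length

theorem pvGetB_eq (m : List (String × List String)) (k : String) :
    pvGetB m k = (pvLookupA m k).getD [] := by
  induction m with
  | nil => simp [pvGetB, pvLookupA]
  | cons p t ih =>
    obtain ⟨k', v⟩ := p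
    by_cases h : k' = k <;> simp [pvGetB, pvLookupA, h, ih]

theorem pvGetB_subset (m : List (String × List String)) (k : String) (x : String)
    (hx : x ∈ pvGetB m k) : x ∈ pvFlatVals m := by
  induction m with
  | nil => simp [pvGetB] at hx
  | cons p t ih =>
    obtain ⟨k', v⟩ := p
    simp only [pvGetB] at hx
    simp only [pvFlatVals, List.map_cons, List.flatten_cons, List.mem_append]
    split at hx
    · exact Or.inl hx
    · exact Or.inr (ih hx)

theorem pvFoldA :
    ∀ (vals sc acc : List String),
      vals.foldl pvStepA (sc, acc) = (sc ++ pvDelta sc vals, acc ++ pvDelta sc vals) := by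
  intro vals
  induction vals with
  | nil => intro sc acc; simp [pvDelta]
  | cons s t ih =>
    intro sc acc
    by_cases h : s ∈ sc
    · simp [pvStepA, pvDelta, h, ih]
    · simp only [List.foldl_cons, pvStepA, if_neg h, PySem.Set.add_of_not_mem h]
      simp [pvDelta, h, ih]

-- B's inner 'for s in …' loop: adds exactly the new elements and raises the flag iff any
theorem pvFoldB :
    ∀ (vals sc : List String) (b : Bool),
      vals.foldl pvInnerB (sc, b)
        = (sc ++ pvDelta sc vals, b || !(pvDelta sc vals).isEmpty) := by
  intro vals
  induction vals with
  | nil => intro sc b; simp [pvDelta]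
  | cons s t ih =>
    intro sc b
    by_cases h : s ∈ sc
    · simp [pvInnerB, pvDelta, h, ih]
    · simp only [List.foldl_cons, pvInnerB, if_neg h]
      rw [ih]
      simp [pvDelta, h]

theorem pvMulti_fst (m : List (String × List String)) :
    ∀ (fs sc : List String), (pvMulti m sc fs).1 = sc ++ (pvMulti m sc fs).2 := by
  intro fs
  induction fs with
  | nil => intro sc; simp [pvMulti]
  | cons c fs ih => intro sc; simp [pvMulti, ih]

-- B's round over a node-list snapshot
theorem pvRoundB (m : List (String × List String)) :
    ∀ (ns sc : List String) (b : Bool),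
      ns.foldl (pvScanB m) (sc, b)
        = ((pvMulti m sc ns).1, b || !(pvMulti m sc ns).2.isEmpty) := by
  intro ns
  induction ns with
  | nil => intro sc b; simp [pvMulti]
  | cons c ns ih =>
    intro sc b
    simp only [List.foldl_cons, pvScanB]
    rw [pvFoldB, ih]
    simp only [pvMulti]
    congr 1
    cases pvDelta sc (pvGetB m c) <;> simp

theorem mem_pvDelta (x : String) :
    ∀ (vals sc : List String), x ∈ pvDelta sc vals → x ∈ vals ∧ x ∉ sc := by
  intro vals
  induction vals with
  | nil => intro sc h; simp [pvDelta] at h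
  | cons s t ih =>
    intro sc h
    simp only [pvDelta] at h
    split at h
    · rcases ih sc h with ⟨h1, h2⟩
      exact ⟨List.mem_cons_of_mem _ h1, h2⟩
    · rcases List.mem_cons.mp h with rfl | h'
      · exact ⟨List.mem_cons_self, by assumption⟩
      · rcases ih (sc ++ [s]) h' with ⟨h1, h2⟩
        exact ⟨List.mem_cons_of_mem _ h1, fun hx => h2 (List.mem_append_left _ hx)⟩

theorem pvDelta_nil_of_subset :
    ∀ (vals sc : List String), (∀ s ∈ vals, s ∈ sc) → pvDelta sc vals = [] := by
  intro vals
  induction vals with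
  | nil => intro sc _; simp [pvDelta]
  | cons s t ih =>
    intro sc h
    have hs : s ∈ sc := h s List.mem_cons_self
    simp only [pvDelta, if_pos hs]
    exact ih sc (fun x hx => h x (List.mem_cons_of_mem _ hx))

theorem subset_pvDelta (s : String) :
    ∀ (vals sc : List String), s ∈ vals → s ∈ sc ++ pvDelta sc vals := by
  intro vals
  induction vals with
  | nil => intro sc h; simp at h
  | cons c t ih =>
    intro sc h
    by_cases hc : c ∈ sc
    · simp only [pvDelta, if_pos hc]
      rcases List.mem_cons.mp h with rfl | h'
      · exact List.mem_append_left _ hc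
      · exact ih sc h'
    · simp only [pvDelta, if_neg hc]
      rcases List.mem_cons.mp h with rfl | h'
      · simp
      · have := ih (sc ++ [c]) h'
        simp only [List.mem_append, List.mem_cons] at this ⊢
        tauto

theorem pvDelta_nodup : ∀ (vals sc : List String), (pvDelta sc vals).Nodup := by
  intro vals
  induction vals with
  | nil => intro sc; simp [pvDelta]
  | cons s t ih =>
    intro sc
    by_cases h : s ∈ sc
    · simp [pvDelta, h, ih]
    · simp only [pvDelta, if_neg h, List.nodup_cons]
      refine ⟨fun hs => ?_, ih _⟩
      exact (mem_pvDelta s t (sc ++ [s]) hs).2 (by simp)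

theorem mem_pvMulti_snd (m : List (String × List String)) (x : String) :
    ∀ (fs sc : List String), x ∈ (pvMulti m sc fs).2 → x ∈ pvFlatVals m ∧ x ∉ sc := by
  intro fs
  induction fs with
  | nil => intro sc h; simp [pvMulti] at h
  | cons c fs ih =>
    intro sc h
    simp only [pvMulti, List.mem_append] at h
    rcases h with h | h
    · rcases mem_pvDelta x _ _ h with ⟨h1, h2⟩
      exact ⟨pvGetB_subset m c x h1, h2⟩
    · rcases ih _ h with ⟨h1, h2⟩
      exact ⟨h1, fun hx => h2 (List.mem_append_left _ hx)⟩

theorem pvMulti_nodup (m : List (String × List String)) :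
    ∀ (fs sc : List String), (pvMulti m sc fs).2.Nodup := by
  intro fs
  induction fs with
  | nil => intro sc; simp [pvMulti]
  | cons c fs ih =>
    intro sc
    simp only [pvMulti]
    rw [List.nodup_append]
    refine ⟨pvDelta_nodup _ _, ih _, fun x hx y hy => ?_⟩
    intro hxy
    subst hxy
    exact (mem_pvMulti_snd m x fs _ hy).2 (List.mem_append_right _ hx)

-- every scanned node is saturated in the final accumulator
theorem pvMulti_sat (m : List (String × List String)) :
    ∀ (fs sc : List String), ∀ v ∈ fs, ∀ s ∈ pvGetB m v, s ∈ (pvMulti m sc fs).1 := by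
  intro fs
  induction fs with
  | nil => intro sc v hv; simp at hv
  | cons c fs ih =>
    intro sc v hv s hs
    simp only [pvMulti]
    rcases List.mem_cons.mp hv with rfl | hv'
    · have h1 : s ∈ sc ++ pvDelta sc (pvGetB m v) := subset_pvDelta s _ sc hs
      rw [pvMulti_fst]
      exact List.mem_append_left _ h1
    · exact ih _ v hv' s hs

-- a saturated prefix of the snapshot contributes nothing
theorem pvMulti_skip (m : List (String × List String)) :
    ∀ (done sc fs : List String), (∀ v ∈ done, ∀ s ∈ pvGetB m v, s ∈ sc) →
      pvMulti m sc (done ++ fs) = pvMulti m sc fs := by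
  intro done
  induction done with
  | nil => intro sc fs _; simp
  | cons c done ih =>
    intro sc fs h
    have hd : pvDelta sc (pvGetB m c) = [] :=
      pvDelta_nil_of_subset _ _ (h c List.mem_cons_self)
    simp only [List.cons_append, pvMulti, hd, List.append_nil, List.nil_append]
    exact ih sc fs (fun v hv => h v (List.mem_cons_of_mem _ hv))

theorem pvFilter_drop_one (l : List String) (hl : l.Nodup) (sc : List String) (x : String)
    (hxl : x ∈ l) (hxsc : x ∉ sc) :
    (l.filter (fun y => decide (y ∉ sc ++ [x]))).length + 1
      ≤ (l.filter (fun y => decide (y ∉ sc))).length := by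
  have hfe : l.filter (fun y => decide (y ∉ sc ++ [x]))
      = (l.filter (fun y => decide (y ∉ sc))).filter (fun y => decide (y ≠ x)) := by
    rw [List.filter_filter]
    apply List.filter_congr
    intro y _
    simp [List.mem_append, not_or, Bool.and_comm]
  rw [hfe]
  set L := l.filter (fun y => decide (y ∉ sc)) with hL
  have hLn : L.Nodup := hl.filter _
  have hxL : x ∈ L := by
    rw [hL]
    simp [List.mem_filter, hxl, hxsc]
  have her : L.erase x = L.filter (fun y => decide (y ≠ x)) := by
    rw [hLn.erase_eq_filter]
    apply List.filter_congr
    intro y _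
    rcases eq_or_ne y x with rfl | h
    · simp
    · simp [h]
  rw [← her, List.length_erase_of_mem hxL]
  have : 1 ≤ L.length := List.length_pos_of_mem hxL
  omega

theorem pvFilter_drop (l : List String) (hl : l.Nodup) :
    ∀ (d sc : List String), d.Nodup → (∀ x ∈ d, x ∈ l ∧ x ∉ sc) →
      (l.filter (fun y => decide (y ∉ sc ++ d))).length + d.length
        ≤ (l.filter (fun y => decide (y ∉ sc))).length := by
  intro d
  induction d with
  | nil => intro sc _ _; simp
  | cons x d' ih =>
    intro sc hd h
    rcases h x List.mem_cons_self with ⟨hxl, hxsc⟩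
    have hfe : l.filter (fun y => decide (y ∉ sc ++ x :: d'))
        = l.filter (fun y => decide (y ∉ (sc ++ [x]) ++ d')) := by
      apply List.filter_congr
      intro y _
      congr 1
      simp [List.mem_append, List.mem_cons]
    have hd' : d'.Nodup := (List.nodup_cons.mp hd).2
    have hxd' : x ∉ d' := (List.nodup_cons.mp hd).1
    have h2 := ih (sc ++ [x]) hd' (fun a ha => by
      rcases h a (List.mem_cons_of_mem _ ha) with ⟨h1, h2⟩
      refine ⟨h1, fun hc => ?_⟩
      rcases List.mem_append.mp hc with hc | hc
      · exact h2 hc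
      · rw [List.mem_singleton] at hc; subst hc; exact hxd' ha)
    have h3 := pvFilter_drop_one l hl sc x hxl hxsc
    rw [hfe]
    simp only [List.length_cons]
    omega

theorem pvCnt_drop (m : List (String × List String)) (d sc : List String) (hd : d.Nodup)
    (h : ∀ x ∈ d, x ∈ pvFlatVals m ∧ x ∉ sc) :
    pvCnt m (sc ++ d) + d.length ≤ pvCnt m sc := by
  unfold pvCnt
  apply pvFilter_drop _ (PySem.Set.nodup_ofList _) d sc hd
  intro x hx
  rcases h x hx with ⟨h1, h2⟩
  exact ⟨(PySem.Set.mem_ofList _ _).mpr h1, h2⟩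

-- A's loop equals the visited-free loop whenever every visited node is saturated
theorem pvStage1 (m : List (String × List String)) :
    ∀ (f : Nat) (sc vis q : List String),
      (∀ v ∈ vis, ∀ s ∈ pvGetB m v, s ∈ sc) →
      pvLoopA m f sc vis q = pvLoopA' m f sc q := by
  intro f
  induction f with
  | zero => intro sc vis q _; simp [pvLoopA, pvLoopA']
  | succ f ih =>
    intro sc vis q hinv
    cases q with
    | nil => simp [pvLoopA, pvLoopA']
    | cons c q' =>
      by_cases hv : c ∈ vis
      · have hδ : pvDelta sc (pvGetB m c) = [] :=
          pvDelta_nil_of_subset _ _ (hinv c hv)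
        simp only [pvLoopA, if_pos hv, pvLoopA', hδ, List.append_nil]
        exact ih sc vis q' hinv
      · cases hlk : pvLookupA m c with
        | none =>
          have hg : pvGetB m c = [] := by simp [pvGetB_eq, hlk]
          simp only [pvLoopA, if_neg hv, hlk, pvLoopA', hg, pvDelta, List.append_nil]
          apply ih
          intro v hvmem s hs
          rcases (PySem.Set.mem_add _ _ _).mp hvmem with h | rfl
          · exact hinv v h s hs
          · rw [hg] at hs; simp at hs
        | some vals =>
          have hg : pvGetB m c = vals := by simp [pvGetB_eq, hlk]
          simp only [pvLoopA, if_neg hv, hlk, pvFoldA, pvLoopA', hg]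
          apply ih
          intro v hvmem s hs
          rcases (PySem.Set.mem_add _ _ _).mp hvmem with h | rfl
          · exact List.mem_append_left _ (hinv v h s hs)
          · rw [hg] at hs; exact subset_pvDelta s vals sc hs

theorem pvLoopA'_append (m : List (String × List String)) :
    ∀ (fs : List String) (f : Nat) (sc acc : List String),
      pvLoopA' m (fs.length + f) sc (fs ++ acc)
        = pvLoopA' m f (pvMulti m sc fs).1 (acc ++ (pvMulti m sc fs).2) := by
  intro fs
  induction fs with
  | nil => intro f sc acc; simp [pvMulti]
  | cons c fs ih =>
    intro f sc acc
    have h1 : (c :: fs).length + f = (fs.length + f) + 1 := by simp; omega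
    rw [h1]
    simp only [List.cons_append, pvLoopA']
    have h2 : (fs ++ acc) ++ pvDelta sc (pvGetB m c)
        = fs ++ (acc ++ pvDelta sc (pvGetB m c)) := by simp
    rw [h2, ih]
    simp [pvMulti]

-- B's result stays duplicate-free
theorem pvWhileB_nodup (m : List (String × List String)) (cu : String) :
    ∀ (f : Nat) (res : List String), res.Nodup → (pvWhileB m cu f res).Nodup := by
  intro f
  induction f with
  | zero => intro res h; simpa [pvWhileB] using h
  | succ f ih =>
    intro res h
    simp only [pvWhileB, pvRoundB]
    set M := pvMulti m res (cu :: res) with hM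
    have hn : M.1.Nodup := by
      rw [pvMulti_fst, List.nodup_append]
      exact ⟨h, pvMulti_nodup m _ _, fun x hx y hy hxy => by
        subst hxy
        exact (mem_pvMulti_snd m x _ _ hy).2 hx⟩
    by_cases hb : !M.2.isEmpty
    · simpa [hb] using ih M.1 hn
    · simpa [hb] using hn

-- the bridge: A's work-list loop equals B's rescan-until-stable loop
theorem pvBridgeW (m : List (String × List String)) (cu : String) :
    ∀ (fB fA : Nat) (sc q done : List String),
      done ++ q = cu :: sc →
      (∀ v ∈ done, ∀ s ∈ pvGetB m v, s ∈ sc) →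
      q.length + pvCnt m sc ≤ fA →
      1 + pvCnt m sc ≤ fB →
      pvLoopA' m fA sc q = pvWhileB m cu fB sc := by
  intro fB
  induction fB with
  | zero => intro fA sc q done _ _ _ h4; omega
  | succ k ih =>
    intro fA sc q done h1 h2 h3 _
    simp only [pvWhileB, pvRoundB, Bool.false_or]
    have hsplit : (cu :: sc) = done ++ q := h1.symm
    rw [hsplit, pvMulti_skip m done sc q h2]
    set M := pvMulti m sc q with hM
    have hq : q.length ≤ fA := by omega
    have hfa : fA = q.length + (fA - q.length) := by omega
    have hA : pvLoopA' m fA sc q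
        = pvLoopA' m (fA - q.length) M.1 M.2 := by
      conv_lhs => rw [hfa]
      have := pvLoopA'_append m q (fA - q.length) sc []
      simpa using this
    rw [hA]
    have hfst : M.1 = sc ++ M.2 := pvMulti_fst m q sc
    by_cases hM2 : M.2 = []
    · have hres : M.1 = sc := by rw [hfst, hM2, List.append_nil]
      rw [hM2, hres]
      cases hf : fA - q.length <;> simp [pvLoopA']
    · have hempty : M.2.isEmpty = false := by
        cases hM2e : M.2 with
        | nil => exact absurd hM2e hM2
        | cons a t => rfl
      rw [if_pos (show (!M.2.isEmpty) = true by rw [hempty]; rfl)]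
      have hcnt : pvCnt m M.1 + M.2.length ≤ pvCnt m sc := by
        rw [hfst]
        exact pvCnt_drop m M.2 sc (pvMulti_nodup m q sc)
          (fun x hx => mem_pvMulti_snd m x q sc hx)
      have hlen2 : 1 ≤ M.2.length := by
        cases hM2e : M.2 with
        | nil => exact absurd hM2e hM2
        | cons a b => simp
      apply ih (fA - q.length) M.1 M.2 (done ++ q)
      · rw [List.append_assoc, ← List.append_assoc done q, h1, hfst]; rfl
      · intro v hv s hs
        rcases List.mem_append.mp hv with hv | hv
        · rw [hfst]; exact List.mem_append_left _ (h2 v hv s hs)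
        · exact pvMulti_sat m q sc v hv s hs
      · omega
      · omega

theorem get_all_superclasses_py_spec : Claim_equal_get_all_superclasses_py := by
  intro class_uri m _
  unfold Spec_get_all_superclasses_py get_all_superclasses_py get_all_superclasses_py_alt
  simp only [PySem.Set.empty]
  rw [pvStage1 m _ _ _ _ (by intro v hv; simp at hv)]
  have h1 : pvCnt m [] ≤ (m.map (fun p => p.2.length)).sum := by
    unfold pvCnt
    calc ((PySem.Set.ofList (pvFlatVals m)).filter (fun x => decide (x ∉ ([] : List String)))).length
        ≤ (PySem.Set.ofList (pvFlatVals m)).length := List.length_filter_le _ _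
      _ ≤ (pvFlatVals m).length := PySem.Set.length_ofList_le _
      _ = (m.map (fun p => p.2.length)).sum := by
          simp [pvFlatVals, List.length_flatten, Function.comp_def]
  rw [pvBridgeW m class_uri (1 + (m.map (fun p => p.2.length)).sum)
      (1 + (m.map (fun p => p.2.length)).sum) [] [class_uri] []
      (by simp) (by simp)
      (by simp only [List.length_cons, List.length_nil]; omega) (by omega)]
  have hn := pvWhileB_nodup m class_uri (1 + (m.map (fun p => p.2.length)).sum) [] (by simp)
  exact (PySem.Set.ofList_eq_self_of_nodup _ hn).symm
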